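-- pv_equiv track=rewrite | github.com/AngoAmit/DNA-try1 | try6.py | calculate_edit_distance_with_markers
-- ===== SOURCE A (Python) =====
-- def calculate_edit_distance_with_markers(seq1, seq2):
--     """
--     Calculate the edit distance between two sequences seq1 and seq2 with detailed editing operations.
--     """
--     m, n = len(seq1), len(seq2)
--     dp = [[[0, '']] * (n + 1) for _ in range(m + 1)]
--
--     # Initialize the base cases
--     for i in range(1, m + 1):
--         dp[i][0] = [i, dp[i-1][0][1] + f"del({seq1[i-1]} {i}) "]
--     for j in range(1, n + 1):
--         dp[0][j] = [j, dp[0][j-1][1] + f"ins({seq2[j-1]} 0) "]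
--
--     # Calculate edit distances and operations
--     for i in range(1, m + 1):
--         for j in range(1, n + 1):
--             if seq1[i-1] == seq2[j-1]:
--                 dp[i][j] = [dp[i-1][j-1][0], dp[i-1][j-1][1]]
--             else:
--                 choices = [
--                     (dp[i-1][j][0] + 1, dp[i-1][j][1] + f"del({seq1[i-1]} {i}) "),
--                     (dp[i][j-1][0] + 1, dp[i][j-1][1] + f"ins({seq2[j-1]} {i}) "),
--                     (dp[i-1][j-1][0] + 1, dp[i-1][j-1][1] + f"sub({seq1[i-1]}->{seq2[j-1]} {i}) ")
--                 ]
--                 dp[i][j] = min(choices, key=lambda x: x[0])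
--
--     # Retrieve the operations and count of deletions
--     edits = dp[m][n][1].strip().split('\n')
--     num_deletions = sum(1 for edit in edits if edit.startswith('del'))
--
--     return dp[m][n][0], dp[m][n][1], num_deletions
-- ===== SOURCE B (Python) =====
-- def calculate_edit_distance_with_markers(seq1, seq2):
--     """
--     Edit distance with operation markers: integer-only DP table plus a single
--     backtracking pass that rebuilds the operation string back-to-front.
--     """
--     m, n = len(seq1), len(seq2)
--     # cost-only DP table, O(m*n) ints (no string concatenation in the loops)
--     cost = [[0] * (n + 1) for _ in range(m + 1)]
--     for i in range(1, m + 1):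
--         cost[i][0] = i
--     for j in range(1, n + 1):
--         cost[0][j] = j
--     for i in range(1, m + 1):
--         row, prev = cost[i], cost[i - 1]
--         c1 = seq1[i - 1]
--         for j in range(1, n + 1):
--             if c1 == seq2[j - 1]:
--                 row[j] = prev[j - 1]
--             else:
--                 row[j] = 1 + min(prev[j], row[j - 1], prev[j - 1])
--     # backtrack once, preferring del, then ins, then sub (min()'s first-minimum rule)
--     ops = ""
--     i, j = m, n
--     while i > 0 or j > 0:
--         if i > 0 and j > 0 and seq1[i - 1] == seq2[j - 1]:
--             i, j = i - 1, j - 1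
--         elif j == 0 or (i > 0 and cost[i - 1][j] <= cost[i][j - 1] and cost[i - 1][j] <= cost[i - 1][j - 1]):
--             ops = f"del({seq1[i - 1]} {i}) " + ops
--             i -= 1
--         elif i == 0 or cost[i][j - 1] <= cost[i - 1][j - 1]:
--             ops = f"ins({seq2[j - 1]} {i}) " + ops
--             j -= 1
--         else:
--             ops = f"sub({seq1[i - 1]}->{seq2[j - 1]} {i}) " + ops
--             i, j = i - 1, j - 1
--     edits = ops.strip().split('\n')
--     num_deletions = sum(1 for edit in edits if edit.startswith('del'))
--     return cost[m][n], ops, num_deletions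
-- ===== Notes on version B (the rewrite author's own statement) =====
-- stated objective: faster
-- what changed: A carries the full operation string in every DP cell (copying O(m+n)-sized strings per cell) and keeps [cost,string] pairs; B fills an integer-only cost table and reconstructs the operation string once by backtracking from (m,n), prepending markers back-to-front.
import Mathlib
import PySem

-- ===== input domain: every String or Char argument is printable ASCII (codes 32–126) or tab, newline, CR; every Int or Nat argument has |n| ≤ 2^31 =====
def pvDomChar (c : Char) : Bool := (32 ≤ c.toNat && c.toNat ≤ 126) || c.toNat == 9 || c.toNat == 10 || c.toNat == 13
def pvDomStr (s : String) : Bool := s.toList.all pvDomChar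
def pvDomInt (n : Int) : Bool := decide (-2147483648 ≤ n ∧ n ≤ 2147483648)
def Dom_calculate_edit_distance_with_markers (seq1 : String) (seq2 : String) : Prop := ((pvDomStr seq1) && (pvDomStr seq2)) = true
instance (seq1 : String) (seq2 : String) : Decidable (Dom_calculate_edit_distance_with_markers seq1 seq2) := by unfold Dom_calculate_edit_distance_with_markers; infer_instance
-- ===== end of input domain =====

-- B replaces A's string-carrying DP (every cell stores its whole operation string) by an
-- integer-only cost table plus one backtracking pass that rebuilds the operation string
-- back-to-front; objective: faster (no per-cell operation-string copying in the inner loop).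

-- shared formatting helpers (both Pythons build literally the same marker strings)
def pvChr (s : String) (i : Int) : Char := (PySem.Str.pyGet? s i).getD ' '  -- every use is in range
def pvDel (c : Char) (i : Int) : String := "del(" ++ String.singleton c ++ " " ++ PySem.Int.toStr i ++ ") "
def pvIns (c : Char) (i : Int) : String := "ins(" ++ String.singleton c ++ " " ++ PySem.Int.toStr i ++ ") "
def pvSb (c d : Char) (i : Int) : String := "sub(" ++ String.singleton c ++ "->" ++ String.singleton d ++ " " ++ PySem.Int.toStr i ++ ") "
-- the common tail: edits = s.strip().split('\n'); sum(1 for edit in edits if edit.startswith('del'))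
def pvCountDel (s : String) : Int :=
  (((PySem.Str.split? (PySem.Str.strip s) "\n").getD []).map
    (fun e => if PySem.Str.startswith e "del" then (1 : Int) else 0)).sum
-- t[a][b] and t[a][b] = v on a nested list (both Pythons index their tables this way)
def pvGet {α : Type} (d : α) (t : List (List α)) (a b : Int) : α :=
  PySem.List.pyGetD (PySem.List.pyGetD t a []) b d
def pvSet {α : Type} (t : List (List α)) (a b : Int) (v : α) : List (List α) :=
  PySem.List.pySetD t a (PySem.List.pySetD (PySem.List.pyGetD t a []) b v)

-- ===== PORT A =====
-- literal transliteration: dp is A's (m+1)×(n+1) list of [cost, string] cells, filled in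
-- A's exact loop order (the three loop bodies are named pvStepA1/pvStepA2/pvStepA3);
-- min(choices, key=lambda x: x[0]) is PySem.List.min? (Python's first-minimum rule)
def pvStepA1 (s1 : String) (dp : List (List (Int × String))) (i : Int) : List (List (Int × String)) :=
  pvSet dp i 0 (i, (pvGet (0,"") dp (i-1) 0).2 ++ pvDel (pvChr s1 (i-1)) i)
def pvStepA2 (s2 : String) (dp : List (List (Int × String))) (j : Int) : List (List (Int × String)) :=
  pvSet dp 0 j (j, (pvGet (0,"") dp 0 (j-1)).2 ++ pvIns (pvChr s2 (j-1)) 0)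
def pvStepA3 (s1 s2 : String) (i : Int) (dp : List (List (Int × String))) (j : Int) : List (List (Int × String)) :=
  if pvChr s1 (i-1) = pvChr s2 (j-1) then
    pvSet dp i j ((pvGet (0,"") dp (i-1) (j-1)).1, (pvGet (0,"") dp (i-1) (j-1)).2)
  else
    pvSet dp i j ((PySem.List.min?
      [((pvGet (0,"") dp (i-1) j).1 + 1, (pvGet (0,"") dp (i-1) j).2 ++ pvDel (pvChr s1 (i-1)) i),
       ((pvGet (0,"") dp i (j-1)).1 + 1, (pvGet (0,"") dp i (j-1)).2 ++ pvIns (pvChr s2 (j-1)) i),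
       ((pvGet (0,"") dp (i-1) (j-1)).1 + 1, (pvGet (0,"") dp (i-1) (j-1)).2 ++ pvSb (pvChr s1 (i-1)) (pvChr s2 (j-1)) i)]
      (fun x => x.1)).getD (0,""))

def calculate_edit_distance_with_markers (seq1 : String) (seq2 : String) : Int × String × Int :=
  let m := PySem.Str.len seq1
  let n := PySem.Str.len seq2
  let dp : List (List (Int × String)) :=
    (PySem.List.pyRange 0 (m+1) 1).map (fun _ => PySem.List.pyRepeat [((0 : Int), "")] (n+1))
  let dp := (PySem.List.pyRange 1 (m+1) 1).foldl (pvStepA1 seq1) dp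
  let dp := (PySem.List.pyRange 1 (n+1) 1).foldl (pvStepA2 seq2) dp
  let dp := (PySem.List.pyRange 1 (m+1) 1).foldl
    (fun dp i => (PySem.List.pyRange 1 (n+1) 1).foldl (pvStepA3 seq1 seq2 i) dp) dp
  ((pvGet (0,"") dp m n).1, (pvGet (0,"") dp m n).2, pvCountDel (pvGet (0,"") dp m n).2)

-- ===== PORT B =====
-- Source B: integer cost table (loop bodies pvStepB1/pvStepB2/pvStepB3), then the while-loop
-- backtracker pvBT that prepends markers to ops
def pvStepB1 (c : List (List Int)) (i : Int) : List (List Int) := pvSet c i 0 i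
def pvStepB2 (c : List (List Int)) (j : Int) : List (List Int) := pvSet c 0 j j
def pvStepB3 (s1 s2 : String) (i : Int) (c : List (List Int)) (j : Int) : List (List Int) :=
  pvSet c i j (if pvChr s1 (i-1) = pvChr s2 (j-1) then pvGet 0 c (i-1) (j-1)
    else 1 + min (min (pvGet 0 c (i-1) j) (pvGet 0 c i (j-1))) (pvGet 0 c (i-1) (j-1)))

def pvBT (s1 s2 : String) (cost : List (List Int)) : Nat → Nat → String → String
  | i, j, ops =>
    if _h0 : i = 0 ∧ j = 0 then ops
    else if _h1 : 0 < i ∧ 0 < j ∧ pvChr s1 ((i : Int)-1) = pvChr s2 ((j : Int)-1) then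
      pvBT s1 s2 cost (i-1) (j-1) ops
    else if _h2 : j = 0 ∨ (0 < i ∧ pvGet 0 cost ((i : Int)-1) (j : Int) ≤ pvGet 0 cost (i : Int) ((j : Int)-1)
                     ∧ pvGet 0 cost ((i : Int)-1) (j : Int) ≤ pvGet 0 cost ((i : Int)-1) ((j : Int)-1)) then
      pvBT s1 s2 cost (i-1) j (pvDel (pvChr s1 ((i : Int)-1)) i ++ ops)
    else if _h3 : i = 0 ∨ pvGet 0 cost (i : Int) ((j : Int)-1) ≤ pvGet 0 cost ((i : Int)-1) ((j : Int)-1) then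
      pvBT s1 s2 cost i (j-1) (pvIns (pvChr s2 ((j : Int)-1)) i ++ ops)
    else
      pvBT s1 s2 cost (i-1) (j-1) (pvSb (pvChr s1 ((i : Int)-1)) (pvChr s2 ((j : Int)-1)) i ++ ops)
  termination_by i j _ => i + j
  decreasing_by all_goals omega

def calculate_edit_distance_with_markers_alt (seq1 : String) (seq2 : String) : Int × String × Int :=
  let m := PySem.Str.len seq1
  let n := PySem.Str.len seq2
  let cost : List (List Int) :=
    (PySem.List.pyRange 0 (m+1) 1).map (fun _ => PySem.List.pyRepeat [(0 : Int)] (n+1))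
  let cost := (PySem.List.pyRange 1 (m+1) 1).foldl pvStepB1 cost
  let cost := (PySem.List.pyRange 1 (n+1) 1).foldl pvStepB2 cost
  let cost := (PySem.List.pyRange 1 (m+1) 1).foldl
    (fun c i => (PySem.List.pyRange 1 (n+1) 1).foldl (pvStepB3 seq1 seq2 i) c) cost
  let ops := pvBT seq1 seq2 cost m.toNat n.toNat ""
  (pvGet 0 cost m n, ops, pvCountDel ops)

-- ===== PRECONDITION & SPEC =====
def Spec_calculate_edit_distance_with_markers (seq1 : String) (seq2 : String) (out : Int × String × Int) : Prop := out = calculate_edit_distance_with_markers_alt seq1 seq2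
instance (seq1 : String) (seq2 : String) (out : Int × String × Int) : Decidable (Spec_calculate_edit_distance_with_markers seq1 seq2 out) := by unfold Spec_calculate_edit_distance_with_markers; infer_instance

-- ===== CLAIM (what is proved, stated in full; the proofs are below) =====
def Claim_equal_calculate_edit_distance_with_markers : Prop := ∀ (seq1 : String) (seq2 : String), Dom_calculate_edit_distance_with_markers seq1 seq2 → Spec_calculate_edit_distance_with_markers seq1 seq2 (calculate_edit_distance_with_markers seq1 seq2)

-- ===== LEMMAS AND PROOFS =====

-- the mathematical DP cell (distance, operation string) both programs compute
def pvES (s1 s2 : String) : Nat → Nat → Int × String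
  | 0, 0 => (0, "")
  | i+1, 0 => ((i : Int)+1, (pvES s1 s2 i 0).2 ++ pvDel (pvChr s1 (i : Int)) ((i : Int)+1))
  | 0, j+1 => ((j : Int)+1, (pvES s1 s2 0 j).2 ++ pvIns (pvChr s2 (j : Int)) 0)
  | i+1, j+1 =>
    if pvChr s1 (i : Int) = pvChr s2 (j : Int) then pvES s1 s2 i j
    else if (pvES s1 s2 i (j+1)).1 + 1 ≤ (pvES s1 s2 (i+1) j).1 + 1 ∧
            (pvES s1 s2 i (j+1)).1 + 1 ≤ (pvES s1 s2 i j).1 + 1 then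
      ((pvES s1 s2 i (j+1)).1 + 1, (pvES s1 s2 i (j+1)).2 ++ pvDel (pvChr s1 (i : Int)) ((i : Int)+1))
    else if (pvES s1 s2 (i+1) j).1 + 1 ≤ (pvES s1 s2 i j).1 + 1 then
      ((pvES s1 s2 (i+1) j).1 + 1, (pvES s1 s2 (i+1) j).2 ++ pvIns (pvChr s2 (j : Int)) ((i : Int)+1))
    else
      ((pvES s1 s2 i j).1 + 1, (pvES s1 s2 i j).2 ++ pvSb (pvChr s1 (i : Int)) (pvChr s2 (j : Int)) ((i : Int)+1))
  termination_by i j => (i, j)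

-- Nat-indexed table access and the table shape invariant (proof-only)
def pvTget {α : Type} (d : α) (t : List (List α)) (a b : Nat) : α := (t[a]?.getD [])[b]?.getD d
def pvShape {α : Type} (t : List (List α)) (M N : Nat) : Prop :=
  t.length = M+1 ∧ ∀ r ∈ t, r.length = N+1

lemma pvGet_natCast {α : Type} (d : α) (t : List (List α)) (a b : Nat) :
    pvGet d t (a : Int) (b : Int) = pvTget d t a b := by
  simp [pvGet, pvTget, List.getD_eq_getElem?_getD]

lemma pvSet_natCast {α : Type} (t : List (List α)) (a b : Nat) (v : α) :
    pvSet t (a : Int) (b : Int) v = t.set a ((t[a]?.getD []).set b v) := by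
  simp [pvSet, List.getD_eq_getElem?_getD]

lemma pvGet_cast {α : Type} (d : α) (t : List (List α)) {i j : Int} (a b : Nat)
    (hi : i = (a : Int)) (hj : j = (b : Int)) : pvGet d t i j = pvTget d t a b := by
  subst hi; subst hj; exact pvGet_natCast d t a b

lemma pvShape_set {α : Type} {t : List (List α)} {M N : Nat} (hs : pvShape t M N)
    (a b : Nat) (ha : a ≤ M) (v : α) : pvShape (pvSet t (a : Int) (b : Int) v) M N := by
  obtain ⟨hl, hr⟩ := hs
  rw [pvSet_natCast]
  refine ⟨by simp [hl], ?_⟩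
  intro r hrm
  rcases List.mem_or_eq_of_mem_set hrm with h | h
  · exact hr r h
  · subst h
    rw [List.length_set]
    have hget : t[a]?.getD [] = t[a]'(by omega) := by
      rw [List.getElem?_eq_getElem (by omega)]; rfl
    rw [hget]
    exact hr _ (List.getElem_mem _)

lemma pvTget_set_eq {α : Type} (d : α) {t : List (List α)} {M N : Nat} (hs : pvShape t M N)
    {a b : Nat} (ha : a ≤ M) (hb : b ≤ N) (v : α) :
    pvTget d (pvSet t (a : Int) (b : Int) v) a b = v := by
  obtain ⟨hl, hr⟩ := hs
  have hal : a < t.length := by omega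
  have hrow : (t[a]?.getD []).length = N+1 := by
    rw [List.getElem?_eq_getElem hal]
    exact hr _ (List.getElem_mem _)
  rw [pvSet_natCast, pvTget, List.getElem?_set_self (by omega), Option.getD_some,
      List.getElem?_set_self (by omega), Option.getD_some]

lemma pvTget_set_ne {α : Type} (d : α) (t : List (List α)) {a b a' b' : Nat}
    (h : ¬(a' = a ∧ b' = b)) (v : α) :
    pvTget d (pvSet t (a : Int) (b : Int) v) a' b' = pvTget d t a' b' := by
  rw [pvSet_natCast, pvTget, pvTget]
  by_cases hae : a' = a
  · subst hae
    have hbb : b' ≠ b := by tauto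
    by_cases hal : a' < t.length
    · rw [List.getElem?_set_self (by omega), Option.getD_some,
        List.getElem?_set_ne (by omega)]
    · rw [List.set_eq_of_length_le (by omega)]
  · rw [List.getElem?_set_ne (by omega)]

lemma pvShape_set' {α : Type} {t : List (List α)} {M N : Nat} (hs : pvShape t M N)
    {i j : Int} (a b : Nat) (hi : i = (a : Int)) (hj : j = (b : Int)) (ha : a ≤ M) (v : α) :
    pvShape (pvSet t i j v) M N := by
  subst hi; subst hj; exact pvShape_set hs a b ha v

lemma pvTget_set_eq' {α : Type} (d : α) {t : List (List α)} {M N : Nat} (hs : pvShape t M N)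
    {i j : Int} {a b : Nat} (hi : i = (a : Int)) (hj : j = (b : Int)) (ha : a ≤ M) (hb : b ≤ N) (v : α) :
    pvTget d (pvSet t i j v) a b = v := by
  subst hi; subst hj; exact pvTget_set_eq d hs ha hb v

lemma pvTget_set_ne' {α : Type} (d : α) (t : List (List α)) {i j : Int} {a b a' b' : Nat}
    (hi : i = (a : Int)) (hj : j = (b : Int)) (h : ¬(a' = a ∧ b' = b)) (v : α) :
    pvTget d (pvSet t i j v) a' b' = pvTget d t a' b' := by
  subst hi; subst hj; exact pvTget_set_ne d t h v

lemma pvShape_init {α : Type} (x : α) (M N : Nat) :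
    pvShape ((PySem.List.pyRange 0 ((M : Int)+1) 1).map (fun _ => PySem.List.pyRepeat [x] ((N : Int)+1))) M N := by
  constructor
  · simp [PySem.List.length_pyRange_one]
  · intro r hrm
    simp only [List.mem_map] at hrm
    obtain ⟨_, _, rfl⟩ := hrm
    rw [PySem.List.pyRepeat_singleton, List.length_replicate]; omega

lemma pvTget_init {α : Type} (x : α) (M N : Nat) (a b : Nat) :
    pvTget x ((PySem.List.pyRange 0 ((M : Int)+1) 1).map (fun _ => PySem.List.pyRepeat [x] ((N : Int)+1))) a b = x := by
  rw [pvTget]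
  rcases Nat.lt_or_ge a (((PySem.List.pyRange 0 ((M : Int)+1) 1).map (fun _ => PySem.List.pyRepeat [x] ((N : Int)+1))).length) with hal | hal
  · rw [List.getElem?_eq_getElem hal, Option.getD_some, List.getElem_map,
      PySem.List.pyRepeat_singleton]
    rcases Nat.lt_or_ge b ((List.replicate ((N:Int)+1).toNat x).length) with hb | hb
    · rw [List.getElem?_eq_getElem hb, Option.getD_some, List.getElem_replicate]
    · rw [List.getElem?_eq_none hb, Option.getD_none]
  · rw [List.getElem?_eq_none hal]; simp

-- Python's min([c1,c2,c3], key=lambda x: x[0]) keeps the FIRST minimum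
lemma pvMin3 (d g b : Int × String) :
    (PySem.List.min? [d, g, b] (fun x => x.1)).getD (0, "") =
      if d.1 ≤ g.1 ∧ d.1 ≤ b.1 then d else if g.1 ≤ b.1 then g else b := by
  by_cases h1 : g.1 < d.1 <;> by_cases h2 : b.1 < g.1 <;> by_cases h3 : b.1 < d.1 <;>
    simp [PySem.List.min?, h1, h2, h3] <;> split_ifs <;> first | rfl | omega

lemma pvES_fst_col (s1 s2 : String) (a : Nat) : (pvES s1 s2 a 0).1 = (a : Int) := by
  cases a <;> simp [pvES]

lemma pvES_fst_row (s1 s2 : String) (b : Nat) : (pvES s1 s2 0 b).1 = (b : Int) := by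
  cases b <;> simp [pvES]

lemma pvES_diag (s1 s2 : String) (i j : Nat) (h : pvChr s1 (i : Int) = pvChr s2 (j : Int)) :
    pvES s1 s2 (i+1) (j+1) = pvES s1 s2 i j := by
  rw [pvES, if_pos h]

lemma pvES_succ (s1 s2 : String) (i j : Nat) (h : ¬ pvChr s1 (i : Int) = pvChr s2 (j : Int)) :
    pvES s1 s2 (i+1) (j+1) =
      if (pvES s1 s2 i (j+1)).1 + 1 ≤ (pvES s1 s2 (i+1) j).1 + 1 ∧
         (pvES s1 s2 i (j+1)).1 + 1 ≤ (pvES s1 s2 i j).1 + 1 then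
        ((pvES s1 s2 i (j+1)).1 + 1, (pvES s1 s2 i (j+1)).2 ++ pvDel (pvChr s1 (i : Int)) ((i : Int)+1))
      else if (pvES s1 s2 (i+1) j).1 + 1 ≤ (pvES s1 s2 i j).1 + 1 then
        ((pvES s1 s2 (i+1) j).1 + 1, (pvES s1 s2 (i+1) j).2 ++ pvIns (pvChr s2 (j : Int)) ((i : Int)+1))
      else
        ((pvES s1 s2 i j).1 + 1, (pvES s1 s2 i j).2 ++ pvSb (pvChr s1 (i : Int)) (pvChr s2 (j : Int)) ((i : Int)+1)) := by
  rw [pvES, if_neg h]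

lemma pvES_fst_else (s1 s2 : String) (i j : Nat)
    (hne : ¬ pvChr s1 (i : Int) = pvChr s2 (j : Int)) :
    (pvES s1 s2 (i+1) (j+1)).1 =
      1 + min (min (pvES s1 s2 i (j+1)).1 (pvES s1 s2 (i+1) j).1) (pvES s1 s2 i j).1 := by
  rw [pvES_succ s1 s2 i j hne]
  split_ifs <;> simp <;> omega

-- the A-side step lemmas
lemma pvStepA3_spec (s1 s2 : String) (K k : Nat)
    {T : List (List (Int × String))} (hr1 : pvTget (0,"") T K (k+1) = pvES s1 s2 K (k+1))
    (hr2 : pvTget (0,"") T (K+1) k = pvES s1 s2 (K+1) k)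
    (hr3 : pvTget (0,"") T K k = pvES s1 s2 K k) :
    pvStepA3 s1 s2 ((K:Int)+1) T ((k:Int)+1) =
      pvSet T ((K:Int)+1) ((k:Int)+1) (pvES s1 s2 (K+1) (k+1)) := by
  rw [pvStepA3, show ((K:Int)+1-1) = ((K:Nat):Int) by ring, show ((k:Int)+1-1) = ((k:Nat):Int) by ring,
    pvGet_cast (0,"") T (i := (K:Int)) (j := (k:Int)+1) K (k+1) rfl (by push_cast; ring),
    pvGet_cast (0,"") T (i := (K:Int)+1) (j := (k:Int)) (K+1) k (by push_cast; ring) rfl,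
    pvGet_cast (0,"") T (i := (K:Int)) (j := (k:Int)) K k rfl rfl, hr1, hr2, hr3]
  by_cases hc : pvChr s1 ((K:Nat):Int) = pvChr s2 ((k:Nat):Int)
  · rw [if_pos hc, pvES_diag s1 s2 K k hc, Prod.mk.eta]
  · rw [if_neg hc, pvMin3, pvES_succ s1 s2 K k hc]

lemma pvA1 (s1 s2 : String) (M N : Nat) (t0 : List (List (Int × String)))
    (hs : pvShape t0 M N) (h0 : ∀ a b : Nat, a ≤ M → b ≤ N → pvTget (0,"") t0 a b = (0,""))
    (k : Nat) (hk : k ≤ M) :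
    pvShape ((PySem.List.pyRange 1 ((k : Int)+1) 1).foldl (pvStepA1 s1) t0) M N ∧
    ∀ a b : Nat, a ≤ M → b ≤ N →
      pvTget (0,"") ((PySem.List.pyRange 1 ((k : Int)+1) 1).foldl (pvStepA1 s1) t0) a b
      = if 1 ≤ a ∧ a ≤ k ∧ b = 0 then pvES s1 s2 a 0 else (0,"") := by
  induction k with
  | zero =>
    rw [show ((0:Nat):Int)+1 = 1 by norm_num, PySem.List.pyRange_one_eq_nil (by omega), List.foldl_nil]
    refine ⟨hs, ?_⟩
    intro a b ha hb
    rw [if_neg (by omega)]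
    exact h0 a b ha hb
  | succ k ih =>
    obtain ⟨ihs, ihv⟩ := ih (by omega)
    rw [show ((k+1:Nat):Int)+1 = ((k:Int)+1)+1 by push_cast; ring,
      PySem.List.pyRange_one_succ_right (by omega), List.foldl_append, List.foldl_cons, List.foldl_nil]
    set T := (PySem.List.pyRange 1 ((k : Int)+1) 1).foldl (pvStepA1 s1) t0 with hT
    rw [pvStepA1, pvGet_cast (0,"") T k 0 (by push_cast; ring) (by norm_num)]
    have hprev : pvTget (0,"") T k 0 = pvES s1 s2 k 0 := by
      rw [ihv k 0 (by omega) (by omega)]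
      rcases Nat.eq_zero_or_pos k with h | h
      · subst h; rw [if_neg (by omega)]; simp [pvES]
      · rw [if_pos (by omega)]
    have hval : ((k:Int)+1, (pvTget (0,"") T k 0).2 ++ pvDel (pvChr s1 ((k:Int)+1-1)) ((k:Int)+1))
        = pvES s1 s2 (k+1) 0 := by
      rw [hprev, show ((k:Int)+1-1) = ((k:Nat):Int) by ring]
      simp [pvES]
    rw [hval]
    refine ⟨pvShape_set' ihs (k+1) 0 (by push_cast; ring) (by norm_num) (by omega) _, ?_⟩
    intro a b ha hb
    by_cases hab : a = k+1 ∧ b = 0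
    · obtain ⟨rfl, rfl⟩ := hab
      rw [pvTget_set_eq' _ ihs (by push_cast; ring) (by norm_num) (by omega) (by omega), if_pos (by omega)]
    · rw [pvTget_set_ne' _ _ (by push_cast; ring) (by norm_num) hab, ihv a b ha hb]
      by_cases h1 : 1 ≤ a ∧ a ≤ k ∧ b = 0
      · rw [if_pos h1, if_pos (show 1 ≤ a ∧ a ≤ k+1 ∧ b = 0 by omega)]
      · rw [if_neg h1, if_neg (show ¬(1 ≤ a ∧ a ≤ k+1 ∧ b = 0) by omega)]

lemma pvA2 (s1 s2 : String) (M N : Nat) (t1 : List (List (Int × String)))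
    (hs : pvShape t1 M N)
    (h1 : ∀ a b : Nat, a ≤ M → b ≤ N → pvTget (0,"") t1 a b = if 1 ≤ a ∧ a ≤ M ∧ b = 0 then pvES s1 s2 a 0 else (0,""))
    (k : Nat) (hk : k ≤ N) :
    pvShape ((PySem.List.pyRange 1 ((k : Int)+1) 1).foldl (pvStepA2 s2) t1) M N ∧
    ∀ a b : Nat, a ≤ M → b ≤ N →
      pvTget (0,"") ((PySem.List.pyRange 1 ((k : Int)+1) 1).foldl (pvStepA2 s2) t1) a b
      = if a = 0 ∧ 1 ≤ b ∧ b ≤ k then pvES s1 s2 0 b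
        else if 1 ≤ a ∧ a ≤ M ∧ b = 0 then pvES s1 s2 a 0 else (0,"") := by
  induction k with
  | zero =>
    rw [show ((0:Nat):Int)+1 = 1 by norm_num, PySem.List.pyRange_one_eq_nil (by omega), List.foldl_nil]
    refine ⟨hs, ?_⟩
    intro a b ha hb
    rw [if_neg (by omega)]
    exact h1 a b ha hb
  | succ k ih =>
    obtain ⟨ihs, ihv⟩ := ih (by omega)
    rw [show ((k+1:Nat):Int)+1 = ((k:Int)+1)+1 by push_cast; ring,
      PySem.List.pyRange_one_succ_right (by omega), List.foldl_append, List.foldl_cons, List.foldl_nil]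
    set T := (PySem.List.pyRange 1 ((k : Int)+1) 1).foldl (pvStepA2 s2) t1 with hT
    rw [pvStepA2, pvGet_cast (0,"") T 0 k (by norm_num) (by push_cast; ring)]
    have hprev : pvTget (0,"") T 0 k = pvES s1 s2 0 k := by
      rw [ihv 0 k (by omega) (by omega)]
      rcases Nat.eq_zero_or_pos k with h | h
      · subst h; rw [if_neg (by omega), if_neg (by omega)]; simp [pvES]
      · rw [if_pos (by omega)]
    have hval : ((k:Int)+1, (pvTget (0,"") T 0 k).2 ++ pvIns (pvChr s2 ((k:Int)+1-1)) 0)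
        = pvES s1 s2 0 (k+1) := by
      rw [hprev, show ((k:Int)+1-1) = ((k:Nat):Int) by ring]
      simp [pvES]
    rw [hval]
    refine ⟨pvShape_set' ihs 0 (k+1) (by norm_num) (by push_cast; ring) (by omega) _, ?_⟩
    intro a b ha hb
    by_cases hab : a = 0 ∧ b = k+1
    · obtain ⟨rfl, rfl⟩ := hab
      rw [pvTget_set_eq' _ ihs (by norm_num) (by push_cast; ring) (by omega) (by omega),
        if_pos (by omega)]
    · rw [pvTget_set_ne' _ _ (by norm_num) (by push_cast; ring) hab, ihv a b ha hb]
      by_cases h2 : a = 0 ∧ 1 ≤ b ∧ b ≤ k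
      · rw [if_pos h2, if_pos (show a = 0 ∧ 1 ≤ b ∧ b ≤ k+1 by omega)]
      · rw [if_neg h2, if_neg (show ¬(a = 0 ∧ 1 ≤ b ∧ b ≤ k+1) by omega)]

lemma pvA3in (s1 s2 : String) (M N : Nat) (K : Nat) (hK : K+1 ≤ M)
    (t : List (List (Int × String))) (hs : pvShape t M N)
    (h0 : ∀ a b : Nat, a ≤ M → b ≤ N → pvTget (0,"") t a b =
      if a ≤ K ∨ b = 0 then pvES s1 s2 a b else (0,""))
    (k : Nat) (hk : k ≤ N) :
    pvShape ((PySem.List.pyRange 1 ((k : Int)+1) 1).foldl (pvStepA3 s1 s2 ((K:Int)+1)) t) M N ∧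
    ∀ a b : Nat, a ≤ M → b ≤ N →
      pvTget (0,"") ((PySem.List.pyRange 1 ((k : Int)+1) 1).foldl (pvStepA3 s1 s2 ((K:Int)+1)) t) a b
      = if a ≤ K ∨ b = 0 ∨ (a = K+1 ∧ b ≤ k) then pvES s1 s2 a b else (0,"") := by
  induction k with
  | zero =>
    rw [show ((0:Nat):Int)+1 = 1 by norm_num, PySem.List.pyRange_one_eq_nil (by omega), List.foldl_nil]
    refine ⟨hs, ?_⟩
    intro a b ha hb
    rw [h0 a b ha hb]
    by_cases h : a ≤ K ∨ b = 0
    · rw [if_pos h, if_pos (by omega)]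
    · rw [if_neg h, if_neg (by omega)]
  | succ k ih =>
    obtain ⟨ihs, ihv⟩ := ih (by omega)
    rw [show ((k+1:Nat):Int)+1 = ((k:Int)+1)+1 by push_cast; ring,
      PySem.List.pyRange_one_succ_right (by omega), List.foldl_append, List.foldl_cons, List.foldl_nil]
    set T := (PySem.List.pyRange 1 ((k : Int)+1) 1).foldl (pvStepA3 s1 s2 ((K:Int)+1)) t with hT
    rw [pvStepA3_spec s1 s2 K k
      (by rw [ihv K (k+1) (by omega) (by omega), if_pos (by omega)])
      (by rw [ihv (K+1) k (by omega) (by omega)]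
          rcases Nat.eq_zero_or_pos k with h | h
          · subst h; rw [if_pos (by omega)]
          · rw [if_pos (by omega)])
      (by rw [ihv K k (by omega) (by omega), if_pos (by omega)])]
    refine ⟨pvShape_set' ihs (K+1) (k+1) (by push_cast; ring) (by push_cast; ring) (by omega) _, ?_⟩
    intro a b ha hb
    by_cases hab : a = K+1 ∧ b = k+1
    · obtain ⟨rfl, rfl⟩ := hab
      rw [pvTget_set_eq' _ ihs (by push_cast; ring) (by push_cast; ring) (by omega) (by omega),
        if_pos (by omega)]
    · rw [pvTget_set_ne' _ _ (by push_cast; ring) (by push_cast; ring) hab, ihv a b ha hb]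
      by_cases h2 : a ≤ K ∨ b = 0 ∨ (a = K+1 ∧ b ≤ k)
      · rw [if_pos h2, if_pos (by omega)]
      · rw [if_neg h2, if_neg (by omega)]

lemma pvA3 (s1 s2 : String) (M N : Nat) (t : List (List (Int × String))) (hs : pvShape t M N)
    (h0 : ∀ a b : Nat, a ≤ M → b ≤ N → pvTget (0,"") t a b =
      if a = 0 ∨ b = 0 then pvES s1 s2 a b else (0,""))
    (k : Nat) (hk : k ≤ M) :
    pvShape ((PySem.List.pyRange 1 ((k : Int)+1) 1).foldl
      (fun dp i => (PySem.List.pyRange 1 ((N : Int)+1) 1).foldl (pvStepA3 s1 s2 i) dp) t) M N ∧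
    ∀ a b : Nat, a ≤ M → b ≤ N →
      pvTget (0,"") ((PySem.List.pyRange 1 ((k : Int)+1) 1).foldl
        (fun dp i => (PySem.List.pyRange 1 ((N : Int)+1) 1).foldl (pvStepA3 s1 s2 i) dp) t) a b
      = if a ≤ k ∨ b = 0 then pvES s1 s2 a b else (0,"") := by
  induction k with
  | zero =>
    rw [show ((0:Nat):Int)+1 = 1 by norm_num,
      PySem.List.pyRange_one_eq_nil (a := 1) (b := 1) (by omega), List.foldl_nil]
    refine ⟨hs, ?_⟩
    intro a b ha hb
    rw [h0 a b ha hb]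
    by_cases h : a = 0 ∨ b = 0
    · rw [if_pos h, if_pos (by omega)]
    · rw [if_neg h, if_neg (by omega)]
  | succ k ih =>
    obtain ⟨ihs, ihv⟩ := ih (by omega)
    rw [show ((k+1:Nat):Int)+1 = ((k:Int)+1)+1 by push_cast; ring,
      PySem.List.pyRange_one_succ_right (a := 1) (b := (k:Int)+1) (by omega),
      List.foldl_append, List.foldl_cons, List.foldl_nil]
    obtain ⟨hs', hv'⟩ := pvA3in s1 s2 M N k (by omega) _ ihs
      (by intro a b ha hb; rw [ihv a b ha hb]) N (by omega)
    refine ⟨hs', ?_⟩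
    intro a b ha hb
    rw [hv' a b ha hb]
    by_cases h : a ≤ k ∨ b = 0 ∨ (a = k+1 ∧ b ≤ N)
    · rw [if_pos h, if_pos (by omega)]
    · rw [if_neg h, if_neg (by omega)]

-- the B-side step lemmas (integer table: same invariants on (pvES …).1)
lemma pvStepB3_spec (s1 s2 : String) (K k : Nat)
    {T : List (List Int)} (hr1 : pvTget 0 T K (k+1) = (pvES s1 s2 K (k+1)).1)
    (hr2 : pvTget 0 T (K+1) k = (pvES s1 s2 (K+1) k).1)
    (hr3 : pvTget 0 T K k = (pvES s1 s2 K k).1) :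
    pvStepB3 s1 s2 ((K:Int)+1) T ((k:Int)+1) =
      pvSet T ((K:Int)+1) ((k:Int)+1) ((pvES s1 s2 (K+1) (k+1)).1) := by
  rw [pvStepB3, show ((K:Int)+1-1) = ((K:Nat):Int) by ring, show ((k:Int)+1-1) = ((k:Nat):Int) by ring,
    pvGet_cast 0 T (i := (K:Int)) (j := (k:Int)+1) K (k+1) rfl (by push_cast; ring),
    pvGet_cast 0 T (i := (K:Int)+1) (j := (k:Int)) (K+1) k (by push_cast; ring) rfl,
    pvGet_cast 0 T (i := (K:Int)) (j := (k:Int)) K k rfl rfl, hr1, hr2, hr3]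
  by_cases hc : pvChr s1 ((K:Nat):Int) = pvChr s2 ((k:Nat):Int)
  · rw [if_pos hc, pvES_diag s1 s2 K k hc]
  · rw [if_neg hc, pvES_fst_else s1 s2 K k hc]

lemma pvB1 (s1 s2 : String) (M N : Nat) (t0 : List (List Int))
    (hs : pvShape t0 M N) (h0 : ∀ a b : Nat, a ≤ M → b ≤ N → pvTget 0 t0 a b = 0)
    (k : Nat) (hk : k ≤ M) :
    pvShape ((PySem.List.pyRange 1 ((k : Int)+1) 1).foldl pvStepB1 t0) M N ∧
    ∀ a b : Nat, a ≤ M → b ≤ N →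
      pvTget 0 ((PySem.List.pyRange 1 ((k : Int)+1) 1).foldl pvStepB1 t0) a b
      = if 1 ≤ a ∧ a ≤ k ∧ b = 0 then (pvES s1 s2 a 0).1 else 0 := by
  induction k with
  | zero =>
    rw [show ((0:Nat):Int)+1 = 1 by norm_num, PySem.List.pyRange_one_eq_nil (by omega), List.foldl_nil]
    refine ⟨hs, ?_⟩
    intro a b ha hb
    rw [if_neg (by omega)]
    exact h0 a b ha hb
  | succ k ih =>
    obtain ⟨ihs, ihv⟩ := ih (by omega)
    rw [show ((k+1:Nat):Int)+1 = ((k:Int)+1)+1 by push_cast; ring,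
      PySem.List.pyRange_one_succ_right (by omega), List.foldl_append, List.foldl_cons, List.foldl_nil]
    set T := (PySem.List.pyRange 1 ((k : Int)+1) 1).foldl pvStepB1 t0 with hT
    rw [pvStepB1, show ((k:Int)+1) = ((pvES s1 s2 (k+1) 0).1) by rw [pvES_fst_col]; push_cast; ring]
    refine ⟨pvShape_set' ihs (k+1) 0 (by rw [pvES_fst_col]) (by norm_num) (by omega) _, ?_⟩
    intro a b ha hb
    by_cases hab : a = k+1 ∧ b = 0
    · obtain ⟨rfl, rfl⟩ := hab
      rw [pvTget_set_eq' _ ihs (by rw [pvES_fst_col]) (by norm_num) (by omega) (by omega), if_pos (by omega)]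
    · rw [pvTget_set_ne' _ _ (by rw [pvES_fst_col]) (by norm_num) hab, ihv a b ha hb]
      by_cases h1 : 1 ≤ a ∧ a ≤ k ∧ b = 0
      · rw [if_pos h1, if_pos (show 1 ≤ a ∧ a ≤ k+1 ∧ b = 0 by omega)]
      · rw [if_neg h1, if_neg (show ¬(1 ≤ a ∧ a ≤ k+1 ∧ b = 0) by omega)]

lemma pvB2 (s1 s2 : String) (M N : Nat) (t1 : List (List Int))
    (hs : pvShape t1 M N)
    (h1 : ∀ a b : Nat, a ≤ M → b ≤ N → pvTget 0 t1 a b = if 1 ≤ a ∧ a ≤ M ∧ b = 0 then (pvES s1 s2 a 0).1 else 0)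
    (k : Nat) (hk : k ≤ N) :
    pvShape ((PySem.List.pyRange 1 ((k : Int)+1) 1).foldl pvStepB2 t1) M N ∧
    ∀ a b : Nat, a ≤ M → b ≤ N →
      pvTget 0 ((PySem.List.pyRange 1 ((k : Int)+1) 1).foldl pvStepB2 t1) a b
      = if a = 0 ∧ 1 ≤ b ∧ b ≤ k then (pvES s1 s2 0 b).1
        else if 1 ≤ a ∧ a ≤ M ∧ b = 0 then (pvES s1 s2 a 0).1 else 0 := by
  induction k with
  | zero =>
    rw [show ((0:Nat):Int)+1 = 1 by norm_num, PySem.List.pyRange_one_eq_nil (by omega), List.foldl_nil]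
    refine ⟨hs, ?_⟩
    intro a b ha hb
    rw [if_neg (by omega)]
    exact h1 a b ha hb
  | succ k ih =>
    obtain ⟨ihs, ihv⟩ := ih (by omega)
    rw [show ((k+1:Nat):Int)+1 = ((k:Int)+1)+1 by push_cast; ring,
      PySem.List.pyRange_one_succ_right (by omega), List.foldl_append, List.foldl_cons, List.foldl_nil]
    set T := (PySem.List.pyRange 1 ((k : Int)+1) 1).foldl pvStepB2 t1 with hT
    rw [pvStepB2, show ((k:Int)+1) = ((pvES s1 s2 0 (k+1)).1) by rw [pvES_fst_row]; push_cast; ring]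
    refine ⟨pvShape_set' ihs 0 (k+1) (by norm_num) (by rw [pvES_fst_row]) (by omega) _, ?_⟩
    intro a b ha hb
    by_cases hab : a = 0 ∧ b = k+1
    · obtain ⟨rfl, rfl⟩ := hab
      rw [pvTget_set_eq' _ ihs (by norm_num) (by rw [pvES_fst_row]) (by omega) (by omega), if_pos (by omega)]
    · rw [pvTget_set_ne' _ _ (by norm_num) (by rw [pvES_fst_row]) hab, ihv a b ha hb]
      by_cases h2 : a = 0 ∧ 1 ≤ b ∧ b ≤ k
      · rw [if_pos h2, if_pos (show a = 0 ∧ 1 ≤ b ∧ b ≤ k+1 by omega)]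
      · rw [if_neg h2, if_neg (show ¬(a = 0 ∧ 1 ≤ b ∧ b ≤ k+1) by omega)]

lemma pvB3in (s1 s2 : String) (M N : Nat) (K : Nat) (hK : K+1 ≤ M)
    (t : List (List Int)) (hs : pvShape t M N)
    (h0 : ∀ a b : Nat, a ≤ M → b ≤ N → pvTget 0 t a b =
      if a ≤ K ∨ b = 0 then (pvES s1 s2 a b).1 else 0)
    (k : Nat) (hk : k ≤ N) :
    pvShape ((PySem.List.pyRange 1 ((k : Int)+1) 1).foldl (pvStepB3 s1 s2 ((K:Int)+1)) t) M N ∧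
    ∀ a b : Nat, a ≤ M → b ≤ N →
      pvTget 0 ((PySem.List.pyRange 1 ((k : Int)+1) 1).foldl (pvStepB3 s1 s2 ((K:Int)+1)) t) a b
      = if a ≤ K ∨ b = 0 ∨ (a = K+1 ∧ b ≤ k) then (pvES s1 s2 a b).1 else 0 := by
  induction k with
  | zero =>
    rw [show ((0:Nat):Int)+1 = 1 by norm_num, PySem.List.pyRange_one_eq_nil (by omega), List.foldl_nil]
    refine ⟨hs, ?_⟩
    intro a b ha hb
    rw [h0 a b ha hb]
    by_cases h : a ≤ K ∨ b = 0
    · rw [if_pos h, if_pos (by omega)]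
    · rw [if_neg h, if_neg (by omega)]
  | succ k ih =>
    obtain ⟨ihs, ihv⟩ := ih (by omega)
    rw [show ((k+1:Nat):Int)+1 = ((k:Int)+1)+1 by push_cast; ring,
      PySem.List.pyRange_one_succ_right (by omega), List.foldl_append, List.foldl_cons, List.foldl_nil]
    set T := (PySem.List.pyRange 1 ((k : Int)+1) 1).foldl (pvStepB3 s1 s2 ((K:Int)+1)) t with hT
    rw [pvStepB3_spec s1 s2 K k
      (by rw [ihv K (k+1) (by omega) (by omega), if_pos (by omega)])
      (by rw [ihv (K+1) k (by omega) (by omega)]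
          rcases Nat.eq_zero_or_pos k with h | h
          · subst h; rw [if_pos (by omega)]
          · rw [if_pos (by omega)])
      (by rw [ihv K k (by omega) (by omega), if_pos (by omega)])]
    refine ⟨pvShape_set' ihs (K+1) (k+1) (by push_cast; ring) (by push_cast; ring) (by omega) _, ?_⟩
    intro a b ha hb
    by_cases hab : a = K+1 ∧ b = k+1
    · obtain ⟨rfl, rfl⟩ := hab
      rw [pvTget_set_eq' _ ihs (by push_cast; ring) (by push_cast; ring) (by omega) (by omega),
        if_pos (by omega)]
    · rw [pvTget_set_ne' _ _ (by push_cast; ring) (by push_cast; ring) hab, ihv a b ha hb]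
      by_cases h2 : a ≤ K ∨ b = 0 ∨ (a = K+1 ∧ b ≤ k)
      · rw [if_pos h2, if_pos (by omega)]
      · rw [if_neg h2, if_neg (by omega)]

lemma pvB3 (s1 s2 : String) (M N : Nat) (t : List (List Int)) (hs : pvShape t M N)
    (h0 : ∀ a b : Nat, a ≤ M → b ≤ N → pvTget 0 t a b =
      if a = 0 ∨ b = 0 then (pvES s1 s2 a b).1 else 0)
    (k : Nat) (hk : k ≤ M) :
    pvShape ((PySem.List.pyRange 1 ((k : Int)+1) 1).foldl
      (fun c i => (PySem.List.pyRange 1 ((N : Int)+1) 1).foldl (pvStepB3 s1 s2 i) c) t) M N ∧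
    ∀ a b : Nat, a ≤ M → b ≤ N →
      pvTget 0 ((PySem.List.pyRange 1 ((k : Int)+1) 1).foldl
        (fun c i => (PySem.List.pyRange 1 ((N : Int)+1) 1).foldl (pvStepB3 s1 s2 i) c) t) a b
      = if a ≤ k ∨ b = 0 then (pvES s1 s2 a b).1 else 0 := by
  induction k with
  | zero =>
    rw [show ((0:Nat):Int)+1 = 1 by norm_num,
      PySem.List.pyRange_one_eq_nil (a := 1) (b := 1) (by omega), List.foldl_nil]
    refine ⟨hs, ?_⟩
    intro a b ha hb
    rw [h0 a b ha hb]
    by_cases h : a = 0 ∨ b = 0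
    · rw [if_pos h, if_pos (by omega)]
    · rw [if_neg h, if_neg (by omega)]
  | succ k ih =>
    obtain ⟨ihs, ihv⟩ := ih (by omega)
    rw [show ((k+1:Nat):Int)+1 = ((k:Int)+1)+1 by push_cast; ring,
      PySem.List.pyRange_one_succ_right (a := 1) (b := (k:Int)+1) (by omega),
      List.foldl_append, List.foldl_cons, List.foldl_nil]
    obtain ⟨hs', hv'⟩ := pvB3in s1 s2 M N k (by omega) _ ihs
      (by intro a b ha hb; rw [ihv a b ha hb]) N (by omega)
    refine ⟨hs', ?_⟩
    intro a b ha hb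
    rw [hv' a b ha hb]
    by_cases h : a ≤ k ∨ b = 0 ∨ (a = k+1 ∧ b ≤ N)
    · rw [if_pos h, if_pos (by omega)]
    · rw [if_neg h, if_neg (by omega)]

-- the backtracker rebuilds exactly the operation string of the string-carrying DP
lemma pvBT_spec (s1 s2 : String) (cost : List (List Int)) (M N : Nat)
    (hc : ∀ a b : Nat, a ≤ M → b ≤ N → pvTget 0 cost (a : Nat) (b : Nat) = (pvES s1 s2 a b).1) :
    ∀ i j : Nat, i ≤ M → j ≤ N → ∀ ops, pvBT s1 s2 cost i j ops = (pvES s1 s2 i j).2 ++ ops := by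
  suffices H : ∀ n i j, i + j ≤ n → i ≤ M → j ≤ N → ∀ ops,
      pvBT s1 s2 cost i j ops = (pvES s1 s2 i j).2 ++ ops by
    exact fun i j hi hj ops => H (i+j) i j le_rfl hi hj ops
  intro n
  induction n with
  | zero =>
    intro i j hij hi hj ops
    obtain ⟨rfl, rfl⟩ : i = 0 ∧ j = 0 := by omega
    rw [pvBT, dif_pos ⟨rfl, rfl⟩]
    rw [show (pvES s1 s2 0 0).2 = "" from by simp [pvES], String.empty_append]
  | succ n ih =>
    intro i j hij hi hj ops
    rw [pvBT]
    by_cases h0 : i = 0 ∧ j = 0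
    · obtain ⟨rfl, rfl⟩ := h0
      rw [dif_pos ⟨rfl, rfl⟩, show (pvES s1 s2 0 0).2 = "" from by simp [pvES], String.empty_append]
    rw [dif_neg h0]
    by_cases h1 : 0 < i ∧ 0 < j ∧ pvChr s1 ((i : Int)-1) = pvChr s2 ((j : Int)-1)
    · -- equal characters: move diagonally, no marker
      obtain ⟨i', rfl⟩ : ∃ i', i = i'+1 := ⟨i-1, by omega⟩
      obtain ⟨j', rfl⟩ : ∃ j', j = j'+1 := ⟨j-1, by omega⟩
      have hch : pvChr s1 (i' : Int) = pvChr s2 (j' : Int) := by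
        have := h1.2.2
        rwa [show ((i'+1 : Nat) : Int)-1 = (i' : Int) by push_cast; ring,
          show ((j'+1 : Nat) : Int)-1 = (j' : Int) by push_cast; ring] at this
      rw [dif_pos h1, show i'+1-1 = i' from rfl, show j'+1-1 = j' from rfl,
        ih i' j' (by omega) (by omega) (by omega) ops, pvES_diag s1 s2 i' j' hch]
    rw [dif_neg h1]
    by_cases h2 : j = 0 ∨ (0 < i ∧ pvGet 0 cost ((i : Int)-1) (j : Int) ≤ pvGet 0 cost (i : Int) ((j : Int)-1)
                     ∧ pvGet 0 cost ((i : Int)-1) (j : Int) ≤ pvGet 0 cost ((i : Int)-1) ((j : Int)-1))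
    · -- deletion step
      rw [dif_pos h2]
      obtain ⟨i', rfl⟩ : ∃ i', i = i'+1 := ⟨i-1, by omega⟩
      rw [show i'+1-1 = i' from rfl,
        show ((i'+1 : Nat) : Int)-1 = ((i' : Nat) : Int) by push_cast; ring,
        ih i' j (by omega) (by omega) hj]
      rcases Nat.eq_zero_or_pos j with rfl | hjpos
      · -- j = 0: first base-case column
        rw [show pvES s1 s2 (i'+1) 0 = ((i' : Int)+1, (pvES s1 s2 i' 0).2 ++ pvDel (pvChr s1 (i' : Int)) ((i' : Int)+1)) from by rw [pvES]]
        dsimp only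
        rw [String.append_assoc, show ((i' : Int)+1) = ((i'+1 : Nat) : Int) by push_cast; ring]
      · -- j > 0: the min chose deletion (first minimum)
        obtain ⟨j', rfl⟩ : ∃ j', j = j'+1 := ⟨j-1, by omega⟩
        have hch : ¬ pvChr s1 (i' : Int) = pvChr s2 (j' : Int) := by
          intro hc'
          exact h1 ⟨by omega, by omega, by
            rwa [show ((i'+1 : Nat) : Int)-1 = (i' : Int) by push_cast; ring,
              show ((j'+1 : Nat) : Int)-1 = (j' : Int) by push_cast; ring]⟩
        rcases h2 with h2 | h2
        · omega
        rw [pvGet_cast 0 cost (i := ((i'+1 : Nat) : Int)-1) (j := ((j'+1 : Nat) : Int)) i' (j'+1)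
              (by push_cast; ring) rfl,
            pvGet_cast 0 cost (i := ((i'+1 : Nat) : Int)) (j := ((j'+1 : Nat) : Int)-1) (i'+1) j'
              rfl (by push_cast; ring),
            pvGet_cast 0 cost (i := ((i'+1 : Nat) : Int)-1) (j := ((j'+1 : Nat) : Int)-1) i' j'
              (by push_cast; ring) (by push_cast; ring),
            hc i' (j'+1) (by omega) (by omega), hc (i'+1) j' (by omega) (by omega),
            hc i' j' (by omega) (by omega)] at h2
        rw [pvES_succ s1 s2 i' j' hch, if_pos (by omega)]
        dsimp only
        rw [String.append_assoc, show ((i' : Int)+1) = ((i'+1 : Nat) : Int) by push_cast; ring]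
    rw [dif_neg h2]
    -- from here on j > 0
    obtain ⟨j', rfl⟩ : ∃ j', j = j'+1 := ⟨j-1, by omega⟩
    by_cases h3 : i = 0 ∨ pvGet 0 cost (i : Int) (((j'+1 : Nat) : Int)-1) ≤ pvGet 0 cost ((i : Int)-1) (((j'+1 : Nat) : Int)-1)
    · -- insertion step
      rw [dif_pos h3, show j'+1-1 = j' from rfl,
        show ((j'+1 : Nat) : Int)-1 = ((j' : Nat) : Int) by push_cast; ring,
        ih i j' (by omega) hi (by omega)]
      rcases Nat.eq_zero_or_pos i with rfl | hipos
      · -- i = 0: first base-case row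
        rw [show pvES s1 s2 0 (j'+1) = ((j' : Int)+1, (pvES s1 s2 0 j').2 ++ pvIns (pvChr s2 (j' : Int)) 0) from by rw [pvES]]
        dsimp only
        rw [String.append_assoc, show ((0 : Nat) : Int) = (0 : Int) by norm_num]
      · -- i > 0: the min chose insertion
        obtain ⟨i', rfl⟩ : ∃ i', i = i'+1 := ⟨i-1, by omega⟩
        have hch : ¬ pvChr s1 (i' : Int) = pvChr s2 (j' : Int) := by
          intro hc'
          exact h1 ⟨by omega, by omega, by
            rwa [show ((i'+1 : Nat) : Int)-1 = (i' : Int) by push_cast; ring,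
              show ((j'+1 : Nat) : Int)-1 = (j' : Int) by push_cast; ring]⟩
        rcases h3 with h3 | h3
        · omega
        rw [pvGet_cast 0 cost (i := ((i'+1 : Nat) : Int)) (j := ((j'+1 : Nat) : Int)-1) (i'+1) j'
              rfl (by push_cast; ring),
            pvGet_cast 0 cost (i := ((i'+1 : Nat) : Int)-1) (j := ((j'+1 : Nat) : Int)-1) i' j'
              (by push_cast; ring) (by push_cast; ring),
            hc (i'+1) j' (by omega) (by omega), hc i' j' (by omega) (by omega)] at h3
        have hnd : ¬ (pvGet 0 cost (((i'+1 : Nat) : Int)-1) ((j'+1 : Nat) : Int) ≤ pvGet 0 cost ((i'+1 : Nat) : Int) (((j'+1 : Nat) : Int)-1)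
            ∧ pvGet 0 cost (((i'+1 : Nat) : Int)-1) ((j'+1 : Nat) : Int) ≤ pvGet 0 cost (((i'+1 : Nat) : Int)-1) (((j'+1 : Nat) : Int)-1)) := by
          intro hcontra
          exact h2 (Or.inr ⟨by omega, hcontra.1, hcontra.2⟩)
        rw [pvGet_cast 0 cost (i := ((i'+1 : Nat) : Int)-1) (j := ((j'+1 : Nat) : Int)) i' (j'+1)
              (by push_cast; ring) rfl,
            pvGet_cast 0 cost (i := ((i'+1 : Nat) : Int)) (j := ((j'+1 : Nat) : Int)-1) (i'+1) j'
              rfl (by push_cast; ring),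
            pvGet_cast 0 cost (i := ((i'+1 : Nat) : Int)-1) (j := ((j'+1 : Nat) : Int)-1) i' j'
              (by push_cast; ring) (by push_cast; ring),
            hc i' (j'+1) (by omega) (by omega), hc (i'+1) j' (by omega) (by omega),
            hc i' j' (by omega) (by omega)] at hnd
        rw [pvES_succ s1 s2 i' j' hch, if_neg (by omega), if_pos (by omega)]
        dsimp only
        rw [String.append_assoc, show ((i' : Int)+1) = ((i'+1 : Nat) : Int) by push_cast; ring]
    · -- substitution step
      rw [dif_neg h3, show j'+1-1 = j' from rfl]
      obtain ⟨i', rfl⟩ : ∃ i', i = i'+1 := ⟨i-1, by omega⟩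
      have hch : ¬ pvChr s1 (i' : Int) = pvChr s2 (j' : Int) := by
        intro hc'
        exact h1 ⟨by omega, by omega, by
          rwa [show ((i'+1 : Nat) : Int)-1 = (i' : Int) by push_cast; ring,
            show ((j'+1 : Nat) : Int)-1 = (j' : Int) by push_cast; ring]⟩
      rw [show i'+1-1 = i' from rfl,
        show ((i'+1 : Nat) : Int)-1 = ((i' : Nat) : Int) by push_cast; ring,
        show ((j'+1 : Nat) : Int)-1 = ((j' : Nat) : Int) by push_cast; ring,
        ih i' j' (by omega) (by omega) (by omega)]
      have hnd : ¬ (pvGet 0 cost (((i'+1 : Nat) : Int)-1) ((j'+1 : Nat) : Int) ≤ pvGet 0 cost ((i'+1 : Nat) : Int) (((j'+1 : Nat) : Int)-1)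
          ∧ pvGet 0 cost (((i'+1 : Nat) : Int)-1) ((j'+1 : Nat) : Int) ≤ pvGet 0 cost (((i'+1 : Nat) : Int)-1) (((j'+1 : Nat) : Int)-1)) := by
        intro hcontra
        exact h2 (Or.inr ⟨by omega, hcontra.1, hcontra.2⟩)
      rw [pvGet_cast 0 cost (i := ((i'+1 : Nat) : Int)-1) (j := ((j'+1 : Nat) : Int)) i' (j'+1)
            (by push_cast; ring) rfl,
          pvGet_cast 0 cost (i := ((i'+1 : Nat) : Int)) (j := ((j'+1 : Nat) : Int)-1) (i'+1) j'
            rfl (by push_cast; ring),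
          pvGet_cast 0 cost (i := ((i'+1 : Nat) : Int)-1) (j := ((j'+1 : Nat) : Int)-1) i' j'
            (by push_cast; ring) (by push_cast; ring),
          hc i' (j'+1) (by omega) (by omega), hc (i'+1) j' (by omega) (by omega),
          hc i' j' (by omega) (by omega)] at hnd
      have h3' : ¬ pvGet 0 cost ((i'+1 : Nat) : Int) (((j'+1 : Nat) : Int)-1) ≤ pvGet 0 cost (((i'+1 : Nat) : Int)-1) (((j'+1 : Nat) : Int)-1) := by
        intro hcontra
        exact h3 (Or.inr hcontra)
      rw [pvGet_cast 0 cost (i := ((i'+1 : Nat) : Int)) (j := ((j'+1 : Nat) : Int)-1) (i'+1) j'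
            rfl (by push_cast; ring),
          pvGet_cast 0 cost (i := ((i'+1 : Nat) : Int)-1) (j := ((j'+1 : Nat) : Int)-1) i' j'
            (by push_cast; ring) (by push_cast; ring),
          hc (i'+1) j' (by omega) (by omega), hc i' j' (by omega) (by omega)] at h3'
      rw [pvES_succ s1 s2 i' j' hch, if_neg (by omega), if_neg (by omega)]
      dsimp only
      rw [String.append_assoc, show ((i' : Int)+1) = ((i'+1 : Nat) : Int) by push_cast; ring]

-- ===== VERDICT (by name: the statement is the Claim_ definition above) =====
theorem calculate_edit_distance_with_markers_spec : Claim_equal_calculate_edit_distance_with_markers := by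
  intro seq1 seq2 _hdom
  unfold Spec_calculate_edit_distance_with_markers
  obtain ⟨M, hM⟩ : ∃ M : Nat, PySem.Str.len seq1 = (M : Int) := ⟨seq1.length, by simp⟩
  obtain ⟨N, hN⟩ : ∃ N : Nat, PySem.Str.len seq2 = (N : Int) := ⟨seq2.length, by simp⟩
  show calculate_edit_distance_with_markers seq1 seq2 = calculate_edit_distance_with_markers_alt seq1 seq2
  simp only [calculate_edit_distance_with_markers, calculate_edit_distance_with_markers_alt,
    hM, hN, Int.toNat_natCast]
  -- the A-side table
  obtain ⟨h1s, h1v⟩ := pvA1 seq1 seq2 M N _ (pvShape_init ((0:Int),"") M N)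
    (fun a b _ _ => pvTget_init ((0:Int),"") M N a b) M le_rfl
  obtain ⟨h2s, h2v⟩ := pvA2 seq1 seq2 M N _ h1s h1v N le_rfl
  obtain ⟨h3s, h3v⟩ := pvA3 seq1 seq2 M N _ h2s
    (by intro a b ha hb
        rw [h2v a b ha hb]
        by_cases hb0 : b = 0
        · subst hb0
          by_cases ha0 : a = 0
          · subst ha0
            rw [if_neg (by omega), if_neg (by omega), if_pos (by omega)]
            simp [pvES]
          · rw [if_neg (by omega), if_pos (by omega), if_pos (by omega)]
        · by_cases ha0 : a = 0
          · subst ha0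
            rw [if_pos (by omega), if_pos (by omega)]
          · rw [if_neg (by omega), if_neg (by omega), if_neg (by omega)]) M le_rfl
  -- the B-side table
  obtain ⟨g1s, g1v⟩ := pvB1 seq1 seq2 M N _ (pvShape_init (0:Int) M N)
    (fun a b _ _ => pvTget_init (0:Int) M N a b) M le_rfl
  obtain ⟨g2s, g2v⟩ := pvB2 seq1 seq2 M N _ g1s g1v N le_rfl
  obtain ⟨g3s, g3v⟩ := pvB3 seq1 seq2 M N _ g2s
    (by intro a b ha hb
        rw [g2v a b ha hb]
        by_cases hb0 : b = 0
        · subst hb0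
          by_cases ha0 : a = 0
          · subst ha0
            rw [if_neg (by omega), if_neg (by omega), if_pos (by omega)]
            simp [pvES]
          · rw [if_neg (by omega), if_pos (by omega), if_pos (by omega)]
        · by_cases ha0 : a = 0
          · subst ha0
            rw [if_pos (by omega), if_pos (by omega)]
          · rw [if_neg (by omega), if_neg (by omega), if_neg (by omega)]) M le_rfl
  have hBcost : ∀ a b : Nat, a ≤ M → b ≤ N →
      pvTget 0 ((PySem.List.pyRange 1 ((M:Int)+1) 1).foldl
        (fun c i => (PySem.List.pyRange 1 ((N:Int)+1) 1).foldl (pvStepB3 seq1 seq2 i) c)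
        ((PySem.List.pyRange 1 ((N:Int)+1) 1).foldl pvStepB2
          ((PySem.List.pyRange 1 ((M:Int)+1) 1).foldl pvStepB1
            ((PySem.List.pyRange 0 ((M:Int)+1) 1).map (fun _ => PySem.List.pyRepeat [(0:Int)] ((N:Int)+1))))))
        a b = (pvES seq1 seq2 a b).1 := by
    intro a b ha hb
    rw [g3v a b ha hb, if_pos (Or.inl ha)]
  rw [pvGet_natCast, h3v M N le_rfl le_rfl, if_pos (Or.inl le_rfl),
    pvGet_natCast, hBcost M N le_rfl le_rfl,
    pvBT_spec seq1 seq2 _ M N hBcost M N le_rfl le_rfl "", String.append_empty]
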